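-- pv_equiv track=rewrite | github.com/washimimizuku/60-days-advanced-data-ai | days/day-20-data-observability/solution.py | _are_metrics_related
-- ===== SOURCE A (Python) =====
-- def _are_metrics_related(metric1: str, metric2: str) -> bool:
--     """Check if two metrics are related"""
--
--     related_groups = [
--         ['data_freshness', 'data_volume', 'overall_health_score'],
--         ['schema_change', 'distribution_anomaly'],
--         ['upstream_failure', 'downstream_impact']
--     ]
--
--     for group in related_groups:
--         if metric1 in group and metric2 in group:
--             return True
--
--     return False
-- ===== SOURCE B (Python) =====
-- _RELATED_GROUPS = [
--     ['data_freshness', 'data_volume', 'overall_health_score'],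
--     ['schema_change', 'distribution_anomaly'],
--     ['upstream_failure', 'downstream_impact']
-- ]
--
-- _GROUP_INDEX = {metric: i for i, group in enumerate(_RELATED_GROUPS) for metric in group}
--
--
-- def _are_metrics_related(metric1: str, metric2: str) -> bool:
--     """Check if two metrics are related"""
--     return metric1 in _GROUP_INDEX and metric2 in _GROUP_INDEX \
--         and _GROUP_INDEX[metric1] == _GROUP_INDEX[metric2]
-- ===== Notes on version B (the rewrite author's own statement) =====
-- stated objective: idiomatic
-- what changed: Replaces the per-call loop over groups with a membership/double-scan per group by a reverse index dict {metric: group_index} built once at module level; the body is a single lookup-and-compare.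
import Mathlib
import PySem

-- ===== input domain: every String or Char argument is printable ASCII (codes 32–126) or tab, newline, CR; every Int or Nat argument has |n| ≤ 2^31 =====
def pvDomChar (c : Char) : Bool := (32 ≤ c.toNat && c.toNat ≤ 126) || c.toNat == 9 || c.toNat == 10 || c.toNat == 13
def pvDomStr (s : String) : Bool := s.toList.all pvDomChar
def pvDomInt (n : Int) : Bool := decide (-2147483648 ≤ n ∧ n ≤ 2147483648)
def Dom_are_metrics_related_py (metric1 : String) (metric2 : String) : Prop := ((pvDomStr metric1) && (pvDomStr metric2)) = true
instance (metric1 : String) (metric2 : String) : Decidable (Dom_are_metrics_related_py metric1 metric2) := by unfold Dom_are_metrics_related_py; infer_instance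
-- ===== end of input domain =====

-- B replaces A's per-call loop over the groups by a reverse index (metric → group number)
-- built once, so the body is a single lookup-and-compare (idiomatic; same observable result).

-- ===== PORT A =====
-- the literal related_groups list of A
def pvRelatedGroups : List (List String) :=
  [["data_freshness", "data_volume", "overall_health_score"],
   ["schema_change", "distribution_anomaly"],
   ["upstream_failure", "downstream_impact"]]

-- the 'for group in related_groups: if … return True' loop, early return as recursion
def pvLoopA (metric1 metric2 : String) : List (List String) → Bool
  | [] => false
  | group :: rest =>
      if group.contains metric1 && group.contains metric2 then true
      else pvLoopA metric1 metric2 rest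

def are_metrics_related_py (metric1 : String) (metric2 : String) : Bool :=
  pvLoopA metric1 metric2 pvRelatedGroups

-- ===== PORT B =====
-- the module-level dict comprehension {metric: i for i, group in enumerate(groups) for metric in group}
def pvGroupIndex : PySem.Dict String Int :=
  (PySem.List.enumerate pvRelatedGroups).foldl
    (fun d ig => ig.2.foldl (fun d m => d.insert m ig.1) d)
    PySem.Dict.empty

def are_metrics_related_py_alt (metric1 : String) (metric2 : String) : Bool :=
  match pvGroupIndex.get? metric1, pvGroupIndex.get? metric2 with
  | some i, some j => i == j
  | _, _ => false

-- ===== PRECONDITION & SPEC =====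
def Spec_are_metrics_related_py (metric1 : String) (metric2 : String) (out : Bool) : Prop := out = are_metrics_related_py_alt metric1 metric2
instance (metric1 : String) (metric2 : String) (out : Bool) : Decidable (Spec_are_metrics_related_py metric1 metric2 out) := by unfold Spec_are_metrics_related_py; infer_instance

-- ===== CLAIM (what is proved, stated in full; the proofs are below) =====
def Claim_equal_are_metrics_related_py : Prop := ∀ (metric1 : String) (metric2 : String), Dom_are_metrics_related_py metric1 metric2 → Spec_are_metrics_related_py metric1 metric2 (are_metrics_related_py metric1 metric2)

-- ===== LEMMAS AND PROOFS =====

-- every string is one of the seven metric names, or distinct from all of them (both directions)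
theorem pvCases7 (s : String) :
    s = "data_freshness" ∨ s = "data_volume" ∨ s = "overall_health_score" ∨
    s = "schema_change" ∨ s = "distribution_anomaly" ∨
    s = "upstream_failure" ∨ s = "downstream_impact" ∨
    ((s ≠ "data_freshness" ∧ ("data_freshness" : String) ≠ s) ∧
     (s ≠ "data_volume" ∧ ("data_volume" : String) ≠ s) ∧
     (s ≠ "overall_health_score" ∧ ("overall_health_score" : String) ≠ s) ∧
     (s ≠ "schema_change" ∧ ("schema_change" : String) ≠ s) ∧
     (s ≠ "distribution_anomaly" ∧ ("distribution_anomaly" : String) ≠ s) ∧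
     (s ≠ "upstream_failure" ∧ ("upstream_failure" : String) ≠ s) ∧
     (s ≠ "downstream_impact" ∧ ("downstream_impact" : String) ≠ s)) := by
  exact
    if h1 : s = "data_freshness" then .inl h1 else
    if h2 : s = "data_volume" then .inr (.inl h2) else
    if h3 : s = "overall_health_score" then .inr (.inr (.inl h3)) else
    if h4 : s = "schema_change" then .inr (.inr (.inr (.inl h4))) else
    if h5 : s = "distribution_anomaly" then .inr (.inr (.inr (.inr (.inl h5)))) else
    if h6 : s = "upstream_failure" then .inr (.inr (.inr (.inr (.inr (.inl h6))))) else
    if h7 : s = "downstream_impact" then .inr (.inr (.inr (.inr (.inr (.inr (.inl h7)))))) else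
    .inr (.inr (.inr (.inr (.inr (.inr (.inr
      ⟨⟨h1, Ne.symm h1⟩, ⟨h2, Ne.symm h2⟩, ⟨h3, Ne.symm h3⟩, ⟨h4, Ne.symm h4⟩,
       ⟨h5, Ne.symm h5⟩, ⟨h6, Ne.symm h6⟩, ⟨h7, Ne.symm h7⟩⟩))))))

-- the reverse index, evaluated to its literal association list
theorem pvGroupIndex_eq :
    pvGroupIndex = PySem.Dict.mk
      [("data_freshness", 0), ("data_volume", 0), ("overall_health_score", 0),
       ("schema_change", 1), ("distribution_anomaly", 1),
       ("upstream_failure", 2), ("downstream_impact", 2)] := by decide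

-- ===== VERDICT (by name: the statement is the Claim_ definition above) =====
theorem are_metrics_related_py_spec : Claim_equal_are_metrics_related_py := by
  intro metric1 metric2 hdom
  unfold Spec_are_metrics_related_py
  clear hdom
  rcases pvCases7 metric1 with rfl | rfl | rfl | rfl | rfl | rfl | rfl |
    ⟨⟨a1, b1⟩, ⟨a2, b2⟩, ⟨a3, b3⟩, ⟨a4, b4⟩, ⟨a5, b5⟩, ⟨a6, b6⟩, ⟨a7, b7⟩⟩ <;>
  rcases pvCases7 metric2 with rfl | rfl | rfl | rfl | rfl | rfl | rfl |
    ⟨⟨c1, d1⟩, ⟨c2, d2⟩, ⟨c3, d3⟩, ⟨c4, d4⟩, ⟨c5, d5⟩, ⟨c6, d6⟩, ⟨c7, d7⟩⟩ <;>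
  first
    | decide
    | simp [are_metrics_related_py, are_metrics_related_py_alt, pvLoopA, pvRelatedGroups,
        pvGroupIndex_eq, PySem.Dict.get?, *]
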